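-- pv_equiv track=rewrite | github.com/jjorloff1/brenton-lxx-error-finder | test_verse_lookup.py | get_verse_words
-- ===== SOURCE A (Python) =====
-- def get_verse_words(verse_ref, verse_map, words_dict):
--     """Get all words for a specific verse."""
--     verse_words = []
--
--     if verse_ref not in verse_map:
--         return verse_words
--
--     start_id = verse_map[verse_ref]
--
--     # Find the next verse to get end boundary
--     sorted_verses = sorted(verse_map.items(), key=lambda x: x[1])
--     current_idx = None
--     for i, (v_ref, v_id) in enumerate(sorted_verses):
--         if v_ref == verse_ref:
--             current_idx = i
--             break
--
--     if current_idx is not None and current_idx + 1 < len(sorted_verses):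
--         end_id = sorted_verses[current_idx + 1][1] - 1
--     else:
--         end_id = max(words_dict.keys()) if words_dict else start_id
--
--     # Extract words in this ID range
--     for word_id in range(start_id, end_id + 1):
--         if word_id in words_dict:
--             verse_words.append(words_dict[word_id])
--
--     return verse_words
-- ===== SOURCE B (Python) =====
-- def get_verse_words(verse_ref, verse_map, words_dict):
--     """Get all words for a specific verse."""
--     if verse_ref not in verse_map:
--         return []
--
--     start_id = verse_map[verse_ref]
--
--     # End boundary: value of the next verse (in value order) minus one.
--     sorted_items = sorted(verse_map.items(), key=lambda kv: kv[1])
--     idx = [kv[0] for kv in sorted_items].index(verse_ref)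
--     if idx + 1 < len(sorted_items):
--         end_id = sorted_items[idx + 1][1] - 1
--     else:
--         end_id = max(words_dict, default=start_id)
--
--     # Collect by filtering the dictionary's own (sorted) keys, instead of
--     # probing every integer in the interval.
--     return [words_dict[wid] for wid in sorted(words_dict) if start_id <= wid <= end_id]
-- ===== Notes on version B (the rewrite author's own statement) =====
-- stated objective: alternative
-- what changed: The final collection no longer scans every integer in [start_id, end_id] probing the dict: B filters the dictionary's own sorted keys; boundary detection uses list.index and max(..., default=...) instead of an enumerate loop and a conditional expression.
import Mathlib
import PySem

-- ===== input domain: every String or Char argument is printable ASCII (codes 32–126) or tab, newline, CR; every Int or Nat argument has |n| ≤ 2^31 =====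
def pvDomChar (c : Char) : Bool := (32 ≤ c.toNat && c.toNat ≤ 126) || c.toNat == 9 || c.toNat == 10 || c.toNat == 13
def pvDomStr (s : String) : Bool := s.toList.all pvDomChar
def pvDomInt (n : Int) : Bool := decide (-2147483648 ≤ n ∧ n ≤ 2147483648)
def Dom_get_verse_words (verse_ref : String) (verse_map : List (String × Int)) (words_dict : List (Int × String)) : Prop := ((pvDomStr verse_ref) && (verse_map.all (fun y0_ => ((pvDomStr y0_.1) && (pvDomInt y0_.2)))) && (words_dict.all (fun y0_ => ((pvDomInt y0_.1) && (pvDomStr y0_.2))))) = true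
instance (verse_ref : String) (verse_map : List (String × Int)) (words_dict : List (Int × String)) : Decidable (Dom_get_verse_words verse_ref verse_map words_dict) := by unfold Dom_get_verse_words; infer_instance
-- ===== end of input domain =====

-- B replaces A's integer-interval scan by filtering the dictionary's own sorted keys (alternative collection strategy; same return value).


-- ===== PORT A =====
-- `max(words_dict.keys()) if words_dict else start_id`
def pvMaxKeysA (words_dict : List (Int × String)) (start_id : Int) : Int :=
  match PySem.List.max? (words_dict.map Prod.fst) (fun x => x) with
  | some m => m
  | none => start_id

def get_verse_words (verse_ref : String) (verse_map : List (String × Int)) (words_dict : List (Int × String)) : List String :=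
  -- `if verse_ref not in verse_map: return []` followed by `start_id = verse_map[verse_ref]`
  match (verse_map.find? (fun p => p.1 == verse_ref)).map Prod.snd with
  | none => []
  | some start_id =>
    let sorted_verses := PySem.List.sorted verse_map (fun x => x.2)
    -- the enumerate/break search for the first index whose verse name matches
    let current_idx := sorted_verses.findIdx? (fun p => p.1 == verse_ref)
    let end_id :=
      match current_idx with
      | some i =>
        if i + 1 < sorted_verses.length then
          ((sorted_verses[i+1]?).map Prod.snd).getD 0 - 1
        else pvMaxKeysA words_dict start_id
      | none => pvMaxKeysA words_dict start_id
    (PySem.List.pyRange start_id (end_id + 1)).foldl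
      (fun verse_words word_id =>
        match words_dict.find? (fun p => p.1 == word_id) with
        | some p => verse_words ++ [p.2]
        | none => verse_words) []

-- ===== PORT B =====
-- `words_dict[wid]` for a key known to be present
def pvWordAt (words_dict : List (Int × String)) (wid : Int) : String :=
  ((words_dict.find? (fun p => p.1 == wid)).map Prod.snd).getD ""

def get_verse_words_alt (verse_ref : String) (verse_map : List (String × Int)) (words_dict : List (Int × String)) : List String :=
  if (verse_map.map Prod.fst).contains verse_ref then
    let start_id := ((verse_map.find? (fun p => p.1 == verse_ref)).map Prod.snd).getD 0
    let sorted_items := PySem.List.sorted verse_map (fun kv => kv.2)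
    match PySem.List.index? (sorted_items.map (fun kv => kv.1)) verse_ref with
    | none => []  -- unreachable: verse_ref is a key of verse_map (list.index cannot raise here)
    | some idx =>
      let end_id :=
        if (idx : Int) + 1 < PySem.List.len sorted_items then
          ((PySem.List.pyGet? sorted_items ((idx : Int) + 1)).map Prod.snd).getD 0 - 1
        else PySem.List.maxD (words_dict.map Prod.fst) (fun x => x) start_id
      ((PySem.List.sorted (words_dict.map Prod.fst) (fun x => x)).filter
          (fun wid => decide (start_id ≤ wid) && decide (wid ≤ end_id))).map
        (fun wid => pvWordAt words_dict wid)
  else []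

-- ===== PRECONDITION & SPEC =====
-- Pre_ only states the dict representation invariant: words_dict stands for a Python dict, whose
-- keys are unique; a duplicate-key association list corresponds to no Python input.
def Pre_get_verse_words (verse_ref : String) (verse_map : List (String × Int)) (words_dict : List (Int × String)) : Prop :=
  (words_dict.map Prod.fst).Nodup
instance (verse_ref : String) (verse_map : List (String × Int)) (words_dict : List (Int × String)) : Decidable (Pre_get_verse_words verse_ref verse_map words_dict) := by unfold Pre_get_verse_words; infer_instance

def pvWitness_get_verse_words : String × (List (String × Int)) × (List (Int × String)) :=
  ("v1", [("v1", 1), ("v2", 3)], [(1, "In"), (2, "principio"), (3, "creavit")])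

def Spec_get_verse_words (verse_ref : String) (verse_map : List (String × Int)) (words_dict : List (Int × String)) (out : List String) : Prop := out = get_verse_words_alt verse_ref verse_map words_dict
instance (verse_ref : String) (verse_map : List (String × Int)) (words_dict : List (Int × String)) (out : List String) : Decidable (Spec_get_verse_words verse_ref verse_map words_dict out) := by unfold Spec_get_verse_words; infer_instance

-- ===== CLAIM (what is proved, stated in full; the proofs are below) =====
def Claim_equal_get_verse_words : Prop := ∀ (verse_ref : String) (verse_map : List (String × Int)) (words_dict : List (Int × String)), Dom_get_verse_words verse_ref verse_map words_dict → Pre_get_verse_words verse_ref verse_map words_dict → Spec_get_verse_words verse_ref verse_map words_dict (get_verse_words verse_ref verse_map words_dict)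

-- ===== LEMMAS AND PROOFS =====

-- A's interval scan collects exactly the words at the dict's keys lying in [s, e], in ascending
-- key order — which is what B's filter of the sorted key list produces.
theorem collect_eq (wd : List (Int × String)) (hnd : (wd.map Prod.fst).Nodup) (s e : Int) :
    (PySem.List.pyRange s (e + 1)).foldl
      (fun acc wid =>
        match wd.find? (fun p => p.1 == wid) with
        | some p => acc ++ [p.2]
        | none => acc) []
    = ((PySem.List.sorted (wd.map Prod.fst) (fun x => x)).filter
        (fun wid => decide (s ≤ wid) && decide (wid ≤ e))).map (fun wid => pvWordAt wd wid) := by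
  have hbody : (fun (acc : List String) (wid : Int) =>
      match wd.find? (fun p => p.1 == wid) with
      | some p => acc ++ [p.2]
      | none => acc)
      = (fun acc wid => if (wd.find? (fun p => p.1 == wid)).isSome then acc ++ [pvWordAt wd wid] else acc) := by
    funext acc wid
    cases h : wd.find? (fun p => p.1 == wid) with
    | none => simp
    | some p => simp [h, pvWordAt]
  rw [hbody, PySem.List.foldl_append_if, List.nil_append]
  congr 1
  have hmemL : ∀ a : Int, a ∈ (PySem.List.pyRange s (e + 1)).filter (fun wid => (wd.find? (fun p => p.1 == wid)).isSome) ↔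
      (a ∈ wd.map Prod.fst ∧ s ≤ a ∧ a ≤ e) := by
    intro a
    simp only [List.mem_filter, PySem.List.mem_pyRange_one, List.find?_isSome, List.mem_map]
    constructor
    · rintro ⟨⟨h1, h2⟩, x, hx, hb⟩
      exact ⟨⟨x, hx, by simpa using hb⟩, h1, by omega⟩
    · rintro ⟨⟨x, hx, hb⟩, h1, h2⟩
      exact ⟨⟨h1, by omega⟩, x, hx, by simpa using hb⟩
  have hsortednd : (PySem.List.sorted (wd.map Prod.fst) (fun x => x)).Nodup :=
    (PySem.List.sorted_perm (wd.map Prod.fst) (fun x => x) false).nodup_iff.mpr hnd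
  have hmemR : ∀ a : Int, a ∈ (PySem.List.sorted (wd.map Prod.fst) (fun x => x)).filter
      (fun wid => decide (s ≤ wid) && decide (wid ≤ e)) ↔ (a ∈ wd.map Prod.fst ∧ s ≤ a ∧ a ≤ e) := by
    intro a
    simp only [List.mem_filter, PySem.List.mem_sorted, Bool.and_eq_true, decide_eq_true_eq]
  have hpwL : ((PySem.List.pyRange s (e + 1)).filter (fun wid => (wd.find? (fun p => p.1 == wid)).isSome)).Pairwise (· < ·) :=
    (PySem.List.pairwise_lt_pyRange_one s (e + 1)).filter _
  have hpwR : ((PySem.List.sorted (wd.map Prod.fst) (fun x => x)).filter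
      (fun wid => decide (s ≤ wid) && decide (wid ≤ e))).Pairwise (· < ·) := by
    have hle := PySem.List.sorted_pairwise (wd.map Prod.fst) (fun x => x)
    have hlt : (PySem.List.sorted (wd.map Prod.fst) (fun x => x)).Pairwise (· < ·) :=
      (hle.and hsortednd).imp (fun h => lt_of_le_of_ne h.1 h.2)
    exact hlt.filter _
  have hperm := (List.perm_ext_iff_of_nodup (hpwL.imp ne_of_lt) (hpwR.imp ne_of_lt)).mpr
    (fun a => (hmemL a).trans (hmemR a).symm)
  exact List.Perm.eq_of_pairwise (fun a b _ _ h1 h2 => le_antisymm h1 h2)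
    (hpwL.imp le_of_lt) (hpwR.imp le_of_lt) hperm

-- B's `list.index` over the sorted key column is A's enumerate/break search.
theorem index_eq (vm : List (String × Int)) (verse_ref : String) :
    PySem.List.index? ((PySem.List.sorted vm (fun kv => kv.2)).map (fun kv => kv.1)) verse_ref
      = (PySem.List.sorted vm (fun x => x.2)).findIdx? (fun p => p.1 == verse_ref) := by
  unfold PySem.List.index?
  rw [List.idxOf?]
  rw [List.findIdx?_map]
  rfl

-- B's `max(words_dict, default=start_id)` is A's `max(words_dict.keys()) if words_dict else start_id`.
theorem maxD_eq (wd : List (Int × String)) (d : Int) :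
    PySem.List.maxD (wd.map Prod.fst) (fun x => x) d = pvMaxKeysA wd d := by
  unfold PySem.List.maxD pvMaxKeysA
  cases PySem.List.max? (wd.map Prod.fst) (fun x => x) <;> rfl

theorem main_spec (verse_ref : String) (vm : List (String × Int)) (wd : List (Int × String))
    (hwd : (wd.map Prod.fst).Nodup) :
    get_verse_words verse_ref vm wd = get_verse_words_alt verse_ref vm wd := by
  unfold get_verse_words get_verse_words_alt
  cases hfind : vm.find? (fun p => p.1 == verse_ref) with
  | none =>
    have hc : (vm.map Prod.fst).contains verse_ref = false := by
      rw [List.contains_eq_any_beq]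
      simp only [List.any_map, List.any_eq_false, Function.comp]
      intro p hp
      have := List.find?_eq_none.mp hfind p hp
      simp only [beq_iff_eq] at this ⊢
      exact fun h => this h.symm
    rw [hc]
    simp
  | some pr =>
    have hmem : pr ∈ vm := List.mem_of_find?_eq_some hfind
    have hkey : pr.1 = verse_ref := by
      have := List.find?_some hfind; simpa using this
    have hc : (vm.map Prod.fst).contains verse_ref = true := by
      rw [List.contains_eq_any_beq]
      simp only [List.any_map, List.any_eq_true, Function.comp]
      exact ⟨pr, hmem, by simp [hkey]⟩
    simp only [hc, Option.map_some, Option.getD_some, if_true, index_eq]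
    cases hidx : (PySem.List.sorted vm (fun x => x.2)).findIdx? (fun p => p.1 == verse_ref) with
    | none =>
      exfalso
      have hmem' : pr ∈ PySem.List.sorted vm (fun x => x.2) :=
        (PySem.List.mem_sorted _ _ _ _).mpr hmem
      have := List.findIdx?_eq_none_iff.mp hidx pr hmem'
      simp [hkey] at this
    | some i =>
      simp only []
      have hE : (if (i : Int) + 1 < PySem.List.len (PySem.List.sorted vm (fun kv => kv.2)) then
            ((PySem.List.pyGet? (PySem.List.sorted vm (fun kv => kv.2)) ((i : Int) + 1)).map Prod.snd).getD 0 - 1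
          else PySem.List.maxD (wd.map Prod.fst) (fun x => x) pr.2)
          = (if i + 1 < (PySem.List.sorted vm (fun x => x.2)).length then
            (((PySem.List.sorted vm (fun x => x.2))[i+1]?).map Prod.snd).getD 0 - 1
          else pvMaxKeysA wd pr.2) := by
        rw [PySem.List.len_eq, maxD_eq]
        have hget : PySem.List.pyGet? (PySem.List.sorted vm (fun kv => kv.2)) ((i : Int) + 1)
            = (PySem.List.sorted vm (fun x => x.2))[i+1]? := by
          have h1 : ((i : Int) + 1) = ((i + 1 : Nat) : Int) := by push_cast; ring
          rw [h1, PySem.List.pyGet?_natCast]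
        rw [hget]
        by_cases h : i + 1 < (PySem.List.sorted vm (fun x => x.2)).length
        · rw [if_pos h, if_pos (by exact_mod_cast by omega)]
        · rw [if_neg h, if_neg (by omega)]
      rw [hE, collect_eq wd hwd]
      rfl

-- ===== VERDICT (by name: the statement is the Claim_ definition above) =====
theorem get_verse_words_spec : Claim_equal_get_verse_words := by
  intro verse_ref verse_map words_dict _hdom hpre
  unfold Spec_get_verse_words
  exact main_spec verse_ref verse_map words_dict hpre
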